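-- pv_equiv track=rewrite | github.com/JWD1990/ylab-python | exercises-for-lesson-2/exercise2.py | check_lose
-- ===== SOURCE A (Python) =====
-- from typing import Optional
--
-- Area_data = list[list[str]]
--
-- Coords = tuple[int, ...]  # row, col
--
-- Cell_data = Optional[Coords]
--
-- Actions_on_coords = Coords
--
-- def check_lose(
--     area: Area_data, rows: int, cols: int,
--     center: Cell_data, check_mark: str
-- ) -> bool:
--     '''
--     Смотрим квадратик 9 на 9 с центром в нашей текущей ячейке,
--     и проверяем в нём главную, доп диагонали и центральные линии
--
--     count_line_elms_for_lose - глобалка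
--     '''
--
--     have_full_line: bool = False
--     side_elms: int = int(count_line_elms_for_lose / 2)
--     max_side_elms: int = side_elms * 2
--     check_positions: int = max_side_elms * 2 + 1
--     start_coords: list[Coords] = [
--         (center[0] - max_side_elms, center[1] - max_side_elms),  # left
--         (center[0] - max_side_elms, center[1]),                  # vertical
--         (center[0] - max_side_elms, center[1] + max_side_elms),  # right
--         (center[0], center[1] - max_side_elms),                  # horizontal
--     ]
--     # каким образом мы будем проходить каждую линию
--     actions_on_coords: list[Actions_on_coords] = [
--         (1, 1), (1, 0), (1, -1), (0, 1)
--     ]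
--
--     # перебираем линии
--     for idx in range(4):
--         if have_full_line:
--             break
--
--         cur_coords: Coords = start_coords[idx]
--         cur_actions: Actions_on_coords = actions_on_coords[idx]
--         count_elms: int = 0
--
--         for offset in range(check_positions):
--             d_row_coord: int = cur_coords[0] + cur_actions[0] * offset
--             d_col_coord: int = cur_coords[1] + cur_actions[1] * offset
--
--             if not (
--                 0 <= d_row_coord <= rows - 1 and 0 <= d_col_coord <= cols - 1
--             ):
--                 continue
--
--             value: str = area[d_row_coord][d_col_coord]
--             count_elms = count_elms + 1 if value == check_mark else 0
--
--             if count_elms == count_line_elms_for_lose: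
--                 have_full_line = True
--                 break
--
--     return have_full_line
--
-- count_line_elms_for_lose: int = 5
-- ===== SOURCE B (Python) =====
-- from itertools import groupby
--
-- count_line_elms_for_lose: int = 5
--
-- def check_lose(area, rows, cols, center, check_mark):
--     side_elms = int(count_line_elms_for_lose / 2)
--     max_side_elms = side_elms * 2
--     check_positions = max_side_elms * 2 + 1
--     directions = [
--         ((center[0] - max_side_elms, center[1] - max_side_elms), (1, 1)),
--         ((center[0] - max_side_elms, center[1]), (1, 0)),
--         ((center[0] - max_side_elms, center[1] + max_side_elms), (1, -1)),
--         ((center[0], center[1] - max_side_elms), (0, 1)),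
--     ]
--     for (r0, c0), (dr, dc) in directions:
--         cells = [
--             area[r0 + dr * k][c0 + dc * k]
--             for k in range(check_positions)
--             if 0 <= r0 + dr * k < rows and 0 <= c0 + dc * k < cols
--         ]
--         for key, group in groupby(cells):
--             if key == check_mark and len(list(group)) >= count_line_elms_for_lose:
--                 return True
--     return False
-- ===== Notes on version B (the rewrite author's own statement) =====
-- stated objective: idiomatic
-- what changed: A scans each line with a running counter that resets on mismatch and breaks at 5; B first collects the in-bounds cell values of each line into a list and then detects a win in a second pass with itertools.groupby, returning True if any group equal to check_mark has length >= 5.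
import Mathlib
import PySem

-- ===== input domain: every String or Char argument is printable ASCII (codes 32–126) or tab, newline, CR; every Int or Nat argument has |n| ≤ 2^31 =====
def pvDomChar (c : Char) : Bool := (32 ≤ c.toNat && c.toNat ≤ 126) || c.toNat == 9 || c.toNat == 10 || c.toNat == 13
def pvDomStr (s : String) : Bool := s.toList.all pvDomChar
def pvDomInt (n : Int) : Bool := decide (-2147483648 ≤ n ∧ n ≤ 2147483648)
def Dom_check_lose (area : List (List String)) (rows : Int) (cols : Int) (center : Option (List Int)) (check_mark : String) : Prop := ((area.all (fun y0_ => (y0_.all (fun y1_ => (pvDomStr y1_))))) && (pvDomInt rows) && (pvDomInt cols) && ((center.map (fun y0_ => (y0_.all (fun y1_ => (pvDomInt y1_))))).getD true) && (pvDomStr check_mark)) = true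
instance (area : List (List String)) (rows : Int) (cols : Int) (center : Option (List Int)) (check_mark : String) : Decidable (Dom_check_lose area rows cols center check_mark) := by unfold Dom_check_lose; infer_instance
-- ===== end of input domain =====

-- B replaces A's reset-on-mismatch running counter by collecting each line's in-bounds
-- cells into a list and then looking for a >=5 run of check_mark with itertools.groupby
-- (same return value; different decomposition, not claimed faster).

-- ===== PORT A =====
-- inner 'for offset in range(check_positions)' loop of A, with count_elms as state
def pvAInner (area : List (List String)) (rows : Int) (cols : Int) (check_mark : String)
    (curR curC actR actC : Int) : List Int → Int → Bool
  | [], _ => false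
  | offset :: rest, count_elms =>
    let d_row : Int := curR + actR * offset
    let d_col : Int := curC + actC * offset
    if 0 ≤ d_row ∧ d_row ≤ rows - 1 ∧ 0 ≤ d_col ∧ d_col ≤ cols - 1 then
      let value : String :=
        (PySem.List.pyGet? ((PySem.List.pyGet? area d_row).getD []) d_col).getD ""
      let count' : Int := if value == check_mark then count_elms + 1 else 0
      if count' == 5 then true
      else pvAInner area rows cols check_mark curR curC actR actC rest count'
    else pvAInner area rows cols check_mark curR curC actR actC rest count_elms

def check_lose (area : List (List String)) (rows : Int) (cols : Int) (center : Option (List Int)) (check_mark : String) : Bool :=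
  match center with
  | none => false  -- Python raises TypeError here; excluded by Pre_
  | some cen =>
    let c0 : Int := (PySem.List.pyGet? cen 0).getD 0  -- getD: IndexError cases excluded by Pre_
    let c1 : Int := (PySem.List.pyGet? cen 1).getD 0
    let side_elms : Int := 5 / 2                      -- int(count_line_elms_for_lose / 2)
    let max_side_elms : Int := side_elms * 2
    let check_positions : Int := max_side_elms * 2 + 1
    let start_coords : List (Int × Int) :=
      [(c0 - max_side_elms, c1 - max_side_elms), (c0 - max_side_elms, c1),
       (c0 - max_side_elms, c1 + max_side_elms), (c0, c1 - max_side_elms)]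
    let actions : List (Int × Int) := [(1, 1), (1, 0), (1, -1), (0, 1)]
    (start_coords.zip actions).foldl
      (fun have_full_line sa =>
        if have_full_line then have_full_line
        else pvAInner area rows cols check_mark sa.1.1 sa.1.2 sa.2.1 sa.2.2
              (PySem.List.pyRange 0 check_positions 1) 0)
      false

-- ===== PORT B =====
def pvCellAt (area : List (List String)) (r c : Int) : String :=
  (PySem.List.pyGet? ((PySem.List.pyGet? area r).getD []) c).getD ""

-- the in-bounds cell values of one line (B's list comprehension with its filter)
def pvCells (area : List (List String)) (rows cols r0 c0 dr dc : Int) (ks : List Int) : List String :=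
  ks.filterMap (fun k =>
    if 0 ≤ r0 + dr * k ∧ r0 + dr * k < rows ∧ 0 ≤ c0 + dc * k ∧ c0 + dc * k < cols then
      some (pvCellAt area (r0 + dr * k) (c0 + dc * k))
    else none)

-- itertools.groupby over a list of strings, each group with its length
def pvGroups : List String → List (String × Int)
  | [] => []
  | v :: rest =>
    (v, 1 + ((rest.takeWhile (fun x => x == v)).length : Int)) ::
      pvGroups (rest.dropWhile (fun x => x == v))
  termination_by l => l.length
  decreasing_by simpa using Nat.lt_succ_of_le (List.length_dropWhile_le _ _)

def check_lose_alt (area : List (List String)) (rows : Int) (cols : Int) (center : Option (List Int)) (check_mark : String) : Bool :=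
  match center with
  | none => false  -- Python raises TypeError here; excluded by Pre_
  | some cen =>
    let c0 : Int := (PySem.List.pyGet? cen 0).getD 0
    let c1 : Int := (PySem.List.pyGet? cen 1).getD 0
    let side_elms : Int := 5 / 2
    let max_side_elms : Int := side_elms * 2
    let check_positions : Int := max_side_elms * 2 + 1
    let directions : List ((Int × Int) × (Int × Int)) :=
      [((c0 - max_side_elms, c1 - max_side_elms), (1, 1)),
       ((c0 - max_side_elms, c1), (1, 0)),
       ((c0 - max_side_elms, c1 + max_side_elms), (1, -1)),
       ((c0, c1 - max_side_elms), (0, 1))]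
    directions.any (fun d =>
      (pvGroups (pvCells area rows cols d.1.1 d.1.2 d.2.1 d.2.2
          (PySem.List.pyRange 0 check_positions 1))).any
        (fun g => g.1 == check_mark && decide ((5 : Int) ≤ g.2)))

-- ===== PRECONDITION & SPEC =====
-- Pre_ excludes a None or <2-element center (TypeError/IndexError in Python A) and boards on
-- which some in-bounds coordinate of the probed 9-cross around the center has no cell in
-- 'area' (declared rows/cols larger than the lists): there A usually raises IndexError, and
-- in the rare case its early exit returns True before touching the missing cell, B raises.
def Pre_check_lose (area : List (List String)) (rows : Int) (cols : Int) (center : Option (List Int)) (check_mark : String) : Prop :=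
  center.isSome ∧ 2 ≤ (center.getD []).length ∧
  ∀ d ∈ ([(1, 1), (1, 0), (1, -1), (0, 1)] : List (Int × Int)),
    ∀ t ∈ PySem.List.pyRange (-4) 5 1,
      (0 ≤ (center.getD []).getD 0 0 + d.1 * t ∧ (center.getD []).getD 0 0 + d.1 * t < rows ∧
       0 ≤ (center.getD []).getD 1 0 + d.2 * t ∧ (center.getD []).getD 1 0 + d.2 * t < cols) →
      ((center.getD []).getD 0 0 + d.1 * t < (area.length : Int) ∧
       (center.getD []).getD 1 0 + d.2 * t <
         ((area.getD ((center.getD []).getD 0 0 + d.1 * t).toNat []).length : Int))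
instance (area : List (List String)) (rows : Int) (cols : Int) (center : Option (List Int)) (check_mark : String) : Decidable (Pre_check_lose area rows cols center check_mark) := by unfold Pre_check_lose; infer_instance

def pvWitness_check_lose : List (List String) × Int × Int × Option (List Int) × String :=
  ([["x", "x"], ["x", "o"]], 2, 2, some [0, 0], "x")

def Spec_check_lose (area : List (List String)) (rows : Int) (cols : Int) (center : Option (List Int)) (check_mark : String) (out : Bool) : Prop := out = check_lose_alt area rows cols center check_mark
instance (area : List (List String)) (rows : Int) (cols : Int) (center : Option (List Int)) (check_mark : String) (out : Bool) : Decidable (Spec_check_lose area rows cols center check_mark out) := by unfold Spec_check_lose; infer_instance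

-- ===== CLAIM (what is proved, stated in full; the proofs are below) =====
def Claim_equal_check_lose : Prop := ∀ (area : List (List String)) (rows : Int) (cols : Int) (center : Option (List Int)) (check_mark : String), Dom_check_lose area rows cols center check_mark → Pre_check_lose area rows cols center check_mark → Spec_check_lose area rows cols center check_mark (check_lose area rows cols center check_mark)

-- ===== LEMMAS AND PROOFS =====

-- A's counter scan over an already-filtered value list (proof-side abstraction of pvAInner)
def pvScan (mark : String) : List String → Int → Bool
  | [], _ => false
  | v :: rest, c =>
    let c' : Int := if v == mark then c + 1 else 0
    if c' == 5 then true else pvScan mark rest c'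

-- A's inner loop = the counter scan over B's collected cell list
theorem pvAInner_eq_scan (area : List (List String)) (rows cols : Int) (mark : String)
    (r0 c0 dr dc : Int) (ks : List Int) (cnt : Int) :
    pvAInner area rows cols mark r0 c0 dr dc ks cnt =
      pvScan mark (pvCells area rows cols r0 c0 dr dc ks) cnt := by
  induction ks generalizing cnt with
  | nil => simp [pvAInner, pvCells, pvScan]
  | cons k rest ih =>
    simp only [pvAInner, pvCells, List.filterMap_cons]
    by_cases h : 0 ≤ r0 + dr * k ∧ r0 + dr * k < rows ∧ 0 ≤ c0 + dc * k ∧ c0 + dc * k < cols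
    · have hA : 0 ≤ r0 + dr * k ∧ r0 + dr * k ≤ rows - 1 ∧ 0 ≤ c0 + dc * k ∧
          c0 + dc * k ≤ cols - 1 := by omega
      rw [if_pos hA, if_pos h]
      simp only [pvScan, pvCellAt, pvCells, ih]
      rfl
    · have hA : ¬ (0 ≤ r0 + dr * k ∧ r0 + dr * k ≤ rows - 1 ∧ 0 ≤ c0 + dc * k ∧
          c0 + dc * k ≤ cols - 1) := by omega
      rw [if_neg hA, if_neg h]
      simpa [pvCells] using ih cnt

theorem pvScan_reset (mark v : String) (h : (v == mark) = false) (t : List String) (c : Int) :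
    pvScan mark (v :: t) c = pvScan mark t 0 := by
  simp [pvScan, h]

theorem pvScan_replicate (mark : String) (m : Nat) (t : List String) (c : Int)
    (h0 : 0 ≤ c) (h5 : c < 5) :
    pvScan mark (List.replicate m mark ++ t) c =
      if 5 ≤ c + m then true else pvScan mark t (c + m) := by
  induction m generalizing c with
  | zero =>
    rw [if_neg (by push_cast; omega)]
    simp
  | succ n ih =>
    rw [List.replicate_succ, List.cons_append]
    simp only [pvScan, beq_self_eq_true, if_true]
    by_cases h : c + 1 = 5
    · have h5' : ((c + 1 == (5:Int)) = true) := by simpa using h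
      rw [if_pos h5', if_pos (show (5:Int) ≤ c + ((n + 1 : Nat) : Int) by push_cast; omega)]
    · have h5' : ((c + 1 == (5:Int)) = false) := by simpa using h
      simp only [h5', Bool.false_eq_true, if_false]
      rw [ih (c + 1) (by omega) (by omega)]
      have he : c + 1 + (n : Int) = c + ((n + 1 : Nat) : Int) := by push_cast; ring
      by_cases hle : (5 : Int) ≤ c + 1 + n
      · rw [if_pos hle, if_pos (by push_cast at hle ⊢; omega)]
      · rw [if_neg hle, if_neg (by push_cast at hle ⊢; omega), he]

-- if nonempty, the head of dropWhile fails the predicate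
theorem pvDropWhile_head (p : String → Bool) (l : List String) :
    l.dropWhile p = [] ∨ ∃ w t, l.dropWhile p = w :: t ∧ p w = false := by
  induction l with
  | nil => exact Or.inl rfl
  | cons v rest ih =>
    by_cases h : p v
    · simpa [List.dropWhile_cons, h] using ih
    · exact Or.inr ⟨v, rest, by simp [List.dropWhile_cons, h], by simpa using h⟩

theorem pvScan_start_irrelevant (mark : String) (l : List String) (c : Int)
    (h : l.dropWhile (fun x => x == mark) = l) :
    pvScan mark l c = pvScan mark l 0 := by
  rcases pvDropWhile_head (fun x => x == mark) l with h0 | ⟨w, t, ht, hw⟩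
  · rw [h] at h0; subst h0; simp [pvScan]
  · rw [h] at ht; subst ht
    rw [pvScan_reset mark w hw, pvScan_reset mark w hw]

theorem pvScan_skip_nonmark (mark : String) (l t : List String)
    (h : ∀ x ∈ l, (x == mark) = false) :
    pvScan mark (l ++ t) 0 = pvScan mark t 0 := by
  induction l with
  | nil => rfl
  | cons a as ihl =>
    rw [List.cons_append, pvScan_reset mark a (h a (by simp))]
    exact ihl (fun x hx => h x (by simp [hx]))

-- main: the counter scan finds a 5-run iff some groupby group of mark has length ≥ 5
theorem pvScan_eq_groups (mark : String) (vs : List String) :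
    pvScan mark vs 0 =
      (pvGroups vs).any (fun g => g.1 == mark && decide ((5 : Int) ≤ g.2)) := by
  generalize hn : vs.length = n
  induction n using Nat.strong_induction_on generalizing vs with
  | _ n ih =>
  cases vs with
  | nil => simp [pvScan, pvGroups]
  | cons v rest =>
    rw [pvGroups]
    have hsplit : rest = rest.takeWhile (fun x => x == v) ++ rest.dropWhile (fun x => x == v) :=
      (List.takeWhile_append_dropWhile).symm
    have hdplen : (rest.dropWhile (fun x => x == v)).length ≤ rest.length :=
      List.length_dropWhile_le _ _
    have hdpfix : (rest.dropWhile (fun x => x == v)).dropWhile (fun x => x == v) =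
        rest.dropWhile (fun x => x == v) := by
      rcases pvDropWhile_head (fun x => x == v) rest with h0 | ⟨w, t, ht, hw⟩
      · rw [h0]; rfl
      · rw [ht]; simp [hw]
    by_cases hv : (v == mark) = true
    · have hveq : v = mark := eq_of_beq hv
      subst hveq
      have htkrep : rest.takeWhile (fun x => x == v) =
          List.replicate (rest.takeWhile (fun x => x == v)).length v := by
        apply List.eq_replicate_of_mem
        intro x hx
        have hxv := List.mem_takeWhile_imp (p := fun y => y == v) hx
        exact eq_of_beq (by simpa using hxv)
      have hvs : v :: rest =
          List.replicate ((rest.takeWhile (fun x => x == v)).length + 1) v ++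
            rest.dropWhile (fun x => x == v) := by
        rw [List.replicate_succ, List.cons_append, ← htkrep, ← hsplit]
      rw [hvs, pvScan_replicate v _ _ 0 (by omega) (by omega)]
      simp only [List.any_cons, beq_self_eq_true, Bool.true_and]
      by_cases h5 : (5 : Int) ≤ 0 + ((rest.takeWhile (fun x => x == v)).length + 1 : Nat)
      · rw [if_pos h5]
        have : decide ((5:Int) ≤ 1 + ((rest.takeWhile (fun x => x == v)).length : Int)) = true := by
          push_cast at h5 ⊢; simp; omega
        rw [this, Bool.true_or]
      · rw [if_neg h5]
        have hd : decide ((5:Int) ≤ 1 + ((rest.takeWhile (fun x => x == v)).length : Int)) = false := by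
          push_cast at h5 ⊢; simp; omega
        rw [hd, Bool.false_or]
        rw [pvScan_start_irrelevant v _ _ hdpfix]
        exact ih _ (by subst hn; simp; omega) _ rfl
    · have hv' : (v == mark) = false := by simpa using hv
      rw [pvScan_reset mark v hv']
      have hscan : pvScan mark rest 0 = pvScan mark (rest.dropWhile (fun x => x == v)) 0 := by
        conv_lhs => rw [hsplit]
        apply pvScan_skip_nonmark
        intro x hx
        have hxv := List.mem_takeWhile_imp (p := fun y => y == v) hx
        have : x = v := eq_of_beq (by simpa using hxv)
        subst this; exact hv'
      rw [hscan]
      simp only [List.any_cons]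
      have hg : ((v == mark) && decide ((5:Int) ≤ 1 + ((rest.takeWhile (fun x => x == v)).length : Int))) = false := by
        simp [hv']
      rw [hg, Bool.false_or]
      exact ih _ (by subst hn; simp; omega) _ rfl

theorem pvFoldl_break {α : Type} (f : α → Bool) (l : List α) (b : Bool) :
    l.foldl (fun h x => if h then h else f x) b = (b || l.any f) := by
  induction l generalizing b with
  | nil => simp
  | cons x xs ihl => cases b <;> simp [List.foldl, ihl]

-- ===== VERDICT (by name: the statement is the Claim_ definition above) =====
theorem check_lose_spec : Claim_equal_check_lose := by
  intro area rows cols center check_mark _ _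
  unfold Spec_check_lose
  cases center with
  | none => rfl
  | some cen =>
    simp only [check_lose, check_lose_alt]
    rw [pvFoldl_break (fun sa : (Int × Int) × Int × Int =>
      pvAInner area rows cols check_mark sa.1.1 sa.1.2 sa.2.1 sa.2.2
        (PySem.List.pyRange 0 (5 / 2 * 2 * 2 + 1) 1) 0)]
    simp only [List.zip, List.zipWith, List.any_cons, List.any_nil, Bool.false_or,
      Bool.or_false, pvAInner_eq_scan, pvScan_eq_groups]
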